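-- pv_equiv track=rewrite | github.com/ZeRori4/IDP | IDP_06-12-2024/block_1/dictionaries/task_03.py | get_lists_dicts
-- ===== SOURCE A (Python) =====
-- def get_lists_dicts(string):
--     dictionary = {}
--     for idx, sub_str in enumerate(string, 1):
--         dictionary[idx] = sub_str
--     return (
--         list(dictionary.keys()),
--         list(dictionary.values()),
--         list(sorted(dictionary.items()))
--     )
-- ===== SOURCE B (Python) =====
-- def get_lists_dicts(string):
--     # Alternative decomposition: build the items list BACK-TO-FRONT with a
--     # descending counter over the reversed string, reverse it once, then unzip.
--     # No dict and no sort: the 1-based indices come out already sorted.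
--     items = []
--     i = len(string)
--     for ch in reversed(string):
--         items.append((i, ch))
--         i -= 1
--     items.reverse()
--     keys = [k for k, _ in items]
--     values = [v for _, v in items]
--     return (keys, values, items)
-- ===== Notes on version B (the rewrite author's own statement) =====
-- stated objective: alternative
-- what changed: B maintains no dictionary and performs no sort: it builds the items list back-to-front by walking the reversed string with a descending counter, reverses it once, and derives keys and values by unzipping, instead of populating a dict via enumerate and reading keys/values/sorted(items) back.
import Mathlib
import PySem

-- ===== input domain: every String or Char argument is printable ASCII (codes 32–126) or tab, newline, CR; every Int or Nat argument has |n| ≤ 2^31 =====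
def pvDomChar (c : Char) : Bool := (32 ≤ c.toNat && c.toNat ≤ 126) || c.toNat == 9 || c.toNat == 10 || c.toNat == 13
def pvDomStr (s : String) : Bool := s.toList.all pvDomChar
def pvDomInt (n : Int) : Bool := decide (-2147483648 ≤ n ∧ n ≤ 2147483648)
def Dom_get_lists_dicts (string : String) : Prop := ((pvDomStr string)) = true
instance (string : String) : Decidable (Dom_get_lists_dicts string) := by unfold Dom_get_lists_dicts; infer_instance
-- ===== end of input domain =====

-- B drops the dict and the sort: it builds the items back-to-front over the reversed
-- string with a descending counter, reverses once, and unzips (objective: alternative).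

-- ===== PORT A =====
def get_lists_dicts (string : String) : List Int × List String × (List (Int × String)) :=
  let dictionary : PySem.Dict Int String :=
    (PySem.List.enumerate string.toList 1).foldl
      (fun d p => d.insert p.1 (String.ofList [p.2])) PySem.Dict.empty
  (dictionary.keys, dictionary.values,
    PySem.List.sorted2 dictionary.items (fun p => p.1) (fun p => p.2))

-- ===== PORT B =====
def get_lists_dicts_alt (string : String) : List Int × List String × (List (Int × String)) :=
  let st := string.toList.reverse.foldl
    (fun (s : Int × List (Int × String)) c => (s.1 - 1, s.2 ++ [(s.1, String.ofList [c])]))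
    (PySem.Str.len string, [])
  let items := st.2.reverse
  (items.map (fun p => p.1), items.map (fun p => p.2), items)

-- ===== PRECONDITION & SPEC =====
def Spec_get_lists_dicts (string : String) (out : List Int × List String × (List (Int × String))) : Prop := out = get_lists_dicts_alt string
instance (string : String) (out : List Int × List String × (List (Int × String))) : Decidable (Spec_get_lists_dicts string out) := by unfold Spec_get_lists_dicts; infer_instance

-- ===== CLAIM (what is proved, stated in full; the proofs are below) =====
def Claim_equal_get_lists_dicts : Prop := ∀ (string : String), Dom_get_lists_dicts string → Spec_get_lists_dicts string (get_lists_dicts string)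

-- ===== LEMMAS AND PROOFS =====

-- The dict built by the enumerate loop (all accumulated keys below the next index) just appends items.
theorem pv_fold_items (xs : List Char) (s : Int) (d : PySem.Dict Int String)
    (h : ∀ k ∈ d.keys, k < s) :
    ((PySem.List.enumerate xs s).foldl
      (fun d p => d.insert p.1 (String.ofList [p.2])) d).items
      = d.items ++ (PySem.List.enumerate xs s).map (fun p => (p.1, String.ofList [p.2])) := by
  induction xs generalizing s d with
  | nil => simp [PySem.List.enumerate_nil]
  | cons c cs ih =>
    rw [PySem.List.enumerate_cons]
    have hnc : d.contains s = false := by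
      by_contra hc
      have hct : d.contains s = true := by
        cases hcv : d.contains s with
        | true => rfl
        | false => exact absurd hcv hc
      have : s ∈ d.keys := (PySem.Dict.contains_iff_mem_keys d s).mp hct
      exact absurd (h s this) (by omega)
    have hkeys : (d.insert s (String.ofList [c])).keys = d.keys ++ [s] :=
      PySem.Dict.keys_insert_of_not_contains d (String.ofList [c]) hnc
    have hitems : (d.insert s (String.ofList [c])).items = d.items ++ [(s, String.ofList [c])] :=
      PySem.Dict.items_insert_of_not_contains d (String.ofList [c]) hnc
    simp only [List.foldl_cons]
    rw [ih (s + 1) (d.insert s (String.ofList [c])) (by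
      intro k hk
      rw [hkeys] at hk
      rcases List.mem_append.mp hk with hk | hk
      · exact lt_trans (h k hk) (by omega)
      · simp at hk; omega)]
    rw [hitems]
    simp [List.map_cons]

-- insertBy only compares the inserted element with members of the list.
theorem pv_insertBy_congr {α : Type} (p q : α → α → Bool) (x : α) (ys : List α)
    (h : ∀ b ∈ ys, p x b = q x b) :
    PySem.List.insertBy p x ys = PySem.List.insertBy q x ys := by
  induction ys with
  | nil => rfl
  | cons y ys ih =>
    simp only [PySem.List.insertBy]
    rw [h y (by simp)]
    split_ifs with hb
    · rfl
    · rw [ih (fun b hb => h b (by simp [hb]))]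

-- The sort-fold is determined by the comparator's values on pairs from a common superset.
theorem pv_foldl_insertBy_congr {α : Type} (S : List α) (p q : α → α → Bool)
    (h : ∀ a ∈ S, ∀ b ∈ S, p a b = q a b) :
    ∀ (xs acc : List α), (∀ a ∈ xs, a ∈ S) → (∀ b ∈ acc, b ∈ S) →
      xs.foldl (fun acc x => PySem.List.insertBy p x acc) acc
        = xs.foldl (fun acc x => PySem.List.insertBy q x acc) acc := by
  intro xs
  induction xs with
  | nil => intro acc _ _; rfl
  | cons x xs ih =>
    intro acc hxs hacc
    simp only [List.foldl_cons]
    rw [pv_insertBy_congr p q x acc (fun b hb => h x (hxs x (by simp)) b (hacc b hb))]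
    apply ih
    · intro a ha; exact hxs a (by simp [ha])
    · intro b hb
      rcases (PySem.List.mem_insertBy q x b acc).mp hb with hbeq | hb2
      · rw [hbeq]; exact hxs x (by simp)
      · exact hacc b hb2

-- On a list whose first components are strictly increasing, sorted2 by (fst, snd) is the identity.
theorem pv_sorted2_eq_self (xs : List (Int × String))
    (hp : xs.Pairwise (fun a b => a.1 < b.1)) :
    PySem.List.sorted2 xs (fun p => p.1) (fun p => p.2) = xs := by
  have hagree : ∀ a ∈ xs, ∀ b ∈ xs,
      (fun a b : Int × String =>
        decide (a.1 < b.1) || (!decide (b.1 < a.1) && decide (a.2 < b.2))) a b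
      = (fun a b : Int × String => decide (a.1 < b.1)) a b := by
    intro a ha b hb
    have hnodup : (xs.map Prod.fst).Nodup := by
      rw [List.Nodup, List.pairwise_map]
      exact hp.imp (fun h => ne_of_lt h)
    by_cases hab : a.1 = b.1
    · have hab' : a = b := List.inj_on_of_nodup_map hnodup ha hb hab
      subst hab'
      simp
    · simp only []
      rcases lt_or_gt_of_ne hab with hlt | hgt
      · simp [hlt, not_lt_of_gt hlt]
      · simp [hgt, not_lt_of_gt hgt]
  have h1 : PySem.List.sorted2 xs (fun p => p.1) (fun p => p.2)
      = PySem.List.sorted xs (fun p => p.1) := by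
    unfold PySem.List.sorted2 PySem.List.sorted
    simp only [if_neg (by decide : ¬ (false = true))]
    exact pv_foldl_insertBy_congr xs _ _ hagree xs [] (fun a ha => ha) (by simp)
  rw [h1]
  exact PySem.List.sorted_eq_of_perm_of_pairwise_lt xs xs _ (List.Perm.refl xs) hp

-- B-side: the descending-counter pairing, as produced back-to-front by B's loop.
def pvZipDown (ys : List Char) (i : Int) : List (Int × String) :=
  match ys with
  | [] => []
  | c :: cs => (i, String.ofList [c]) :: pvZipDown cs (i - 1)

-- B's loop body: the accumulator after the fold is acc ++ pvZipDown ys i.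
theorem pv_fold_down (ys : List Char) (i : Int) (acc : List (Int × String)) :
    (ys.foldl
      (fun (s : Int × List (Int × String)) c => (s.1 - 1, s.2 ++ [(s.1, String.ofList [c])]))
      (i, acc)).2 = acc ++ pvZipDown ys i := by
  induction ys generalizing i acc with
  | nil => simp [pvZipDown]
  | cons c cs ih => simp [pvZipDown, ih]

theorem pvZipDown_append (ys : List Char) (c : Char) (i : Int) :
    pvZipDown (ys ++ [c]) i = pvZipDown ys i ++ [(i - ys.length, String.ofList [c])] := by
  induction ys generalizing i with
  | nil => simp [pvZipDown]
  | cons d ds ih =>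
    simp only [List.cons_append, pvZipDown, ih, List.length_cons]
    have h : i - 1 - (ds.length : Int) = i - ((ds.length + 1 : Nat) : Int) := by
      push_cast; ring
    rw [h]

-- Reversing the enumerate-map form gives the descending pairing of the reversed string.
theorem pv_enum_rev (xs : List Char) (s : Int) :
    ((PySem.List.enumerate xs s).map (fun p => (p.1, String.ofList [p.2]))).reverse
      = pvZipDown xs.reverse (s + xs.length - 1) := by
  induction xs generalizing s with
  | nil => simp [PySem.List.enumerate_nil, pvZipDown]
  | cons c cs ih =>
    rw [PySem.List.enumerate_cons]
    simp only [List.map_cons, List.reverse_cons, List.reverse_cons]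
    rw [ih (s + 1), pvZipDown_append]
    have h1 : s + 1 + (cs.length : Int) - 1 = s + ((c :: cs).length : Int) - 1 := by
      simp only [List.length_cons]; push_cast; ring
    rw [h1]
    congr 3
    simp only [List.length_reverse, List.length_cons]
    push_cast
    omega

-- ===== VERDICT (by name: the statement is the Claim_ definition above) =====
theorem get_lists_dicts_spec : Claim_equal_get_lists_dicts := by
  intro string _
  unfold Spec_get_lists_dicts get_lists_dicts get_lists_dicts_alt
  -- A's dict items are exactly the enumerate-map list E
  have hitems := pv_fold_items string.toList 1 PySem.Dict.empty (by simp [PySem.Dict.keys_empty])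
  have hitems0 : (PySem.Dict.empty : PySem.Dict Int String).items = [] := rfl
  rw [hitems0, List.nil_append] at hitems
  set E := (PySem.List.enumerate string.toList 1).map (fun p => (p.1, String.ofList [p.2])) with hE
  -- B's items are E as well
  have hb : ((string.toList.reverse.foldl
      (fun (s : Int × List (Int × String)) c => (s.1 - 1, s.2 ++ [(s.1, String.ofList [c])]))
      (PySem.Str.len string, [])).2).reverse = E := by
    rw [pv_fold_down, List.nil_append]
    have hlen : PySem.Str.len string = 1 + (string.toList.length : Int) - 1 := by
      simp [PySem.Str.len]
    rw [hlen, ← pv_enum_rev string.toList 1, List.reverse_reverse]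
  have hpair : E.Pairwise (fun a b => a.1 < b.1) := by
    refine List.Pairwise.map _ ?_ (PySem.List.pairwise_lt_enumerate string.toList 1)
    intro a b hab
    exact hab
  simp only [hb]
  refine Prod.ext ?_ (Prod.ext ?_ ?_)
  · simp only [PySem.Dict.keys, hitems]
  · simp only [PySem.Dict.values, hitems]
  · dsimp only
    rw [hitems, pv_sorted2_eq_self _ hpair]
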